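-- pv_equiv track=rewrite | github.com/fallofpheonix/AutoTRandHD | src/eval/analysis.py | _char_substitutions
-- ===== SOURCE A (Python) =====
-- from typing import Dict, List, Tuple
--
-- def _char_substitutions(pred: str, ref: str) -> List[Tuple[str, str]]:
--     """Return list of ``(pred_char, ref_char)`` substitution pairs."""
--     # Standard DP edit distance with backtracking.
--     m, n = len(pred), len(ref)
--     # dp[i][j] = edit distance between pred[:i] and ref[:j]
--     dp = [[0] * (n + 1) for _ in range(m + 1)]
--     for i in range(m + 1):
--         dp[i][0] = i
--     for j in range(n + 1):
--         dp[0][j] = j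
--
--     for i in range(1, m + 1):
--         for j in range(1, n + 1):
--             if pred[i - 1] == ref[j - 1]:
--                 dp[i][j] = dp[i - 1][j - 1]
--             else:
--                 dp[i][j] = 1 + min(dp[i - 1][j - 1], dp[i - 1][j], dp[i][j - 1])
--
--     # Backtrack to find substitutions.
--     subs: List[Tuple[str, str]] = []
--     i, j = m, n
--     while i > 0 and j > 0:
--         if pred[i - 1] == ref[j - 1]:
--             i -= 1
--             j -= 1
--         elif dp[i][j] == dp[i - 1][j - 1] + 1:
--             subs.append((pred[i - 1], ref[j - 1]))
--             i -= 1
--             j -= 1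
--         elif dp[i][j] == dp[i - 1][j] + 1:
--             i -= 1  # deletion
--         else:
--             j -= 1  # insertion
--
--     return subs
-- ===== SOURCE B (Python) =====
-- def _char_substitutions(pred, ref):
--     """Return list of ``(pred_char, ref_char)`` substitution pairs.
--
--     Fused single-phase DP: every cell carries (distance, substitution
--     chain) where the chain is a shared immutable linked list; the
--     answer is read off the final cell, so there is no backtracking
--     phase at all.  Rolling row, O(n) rows kept.
--     """
--     m, n = len(pred), len(ref)
--     # cell = (dist, chain); chain = None | ((pc, rc), parent_chain)
--     prev = [(j, None) for j in range(n + 1)]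
--     for i in range(1, m + 1):
--         pc = pred[i - 1]
--         cur = [(i, None)]
--         for j in range(1, n + 1):
--             d1, c1 = prev[j - 1]
--             if pc == ref[j - 1]:
--                 cur.append((d1, c1))
--             else:
--                 d2, c2 = prev[j]
--                 d3, c3 = cur[j - 1]
--                 b = min(d1, d2, d3)
--                 if d1 == b:
--                     cur.append((b + 1, ((pc, ref[j - 1]), c1)))
--                 elif d2 == b:
--                     cur.append((b + 1, c2))
--                 else:
--                     cur.append((b + 1, c3))
--         prev = cur
--     out = []
--     chain = prev[n][1]
--     while chain is not None:
--         out.append(chain[0])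
--         chain = chain[1]
--     return out
-- ===== Notes on version B (the rewrite author's own statement) =====
-- stated objective: alternative
-- what changed: B fuses fill and traceback into a single forward pass: every DP cell carries (distance, substitution chain) as a shared immutable linked list and the answer is read directly off cell (m,n), eliminating A's second value-comparing backtrack loop and the full (m+1)x(n+1) table (only a rolling row is kept).
import Mathlib
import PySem

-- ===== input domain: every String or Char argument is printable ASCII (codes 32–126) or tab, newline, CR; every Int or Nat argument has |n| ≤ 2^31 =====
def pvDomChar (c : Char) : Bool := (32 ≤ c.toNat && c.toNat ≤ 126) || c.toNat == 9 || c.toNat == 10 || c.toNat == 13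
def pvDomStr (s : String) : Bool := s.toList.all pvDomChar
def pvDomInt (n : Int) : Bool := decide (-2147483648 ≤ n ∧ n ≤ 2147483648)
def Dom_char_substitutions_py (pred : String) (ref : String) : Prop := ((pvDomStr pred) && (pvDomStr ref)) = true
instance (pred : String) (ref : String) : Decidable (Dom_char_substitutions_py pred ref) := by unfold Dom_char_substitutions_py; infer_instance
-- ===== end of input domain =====

-- B fuses the two phases of A into one: each DP cell carries (distance, substitution
-- chain as a shared immutable linked list) and the answer is read off the final cell,
-- so A's value-comparing backtrack loop disappears entirely; alternative decomposition.

-- ===== PORT A =====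

-- inner loop of A's fill (row i): walks ref chars with the previous row;
-- `diag` = dp[i-1][j-1], `up` = dp[i-1][j], `left` = dp[i][j-1]
def pvRowGoA (pc : Char) (rcs : List Char) (prevTail : List Nat) (diag left : Nat) : List Nat :=
  match rcs, prevTail with
  | rc :: rcs', up :: prev' =>
    (if pc == rc then diag else 1 + min diag (min up left)) ::
      pvRowGoA pc rcs' prev' up (if pc == rc then diag else 1 + min diag (min up left))
  | _, _ => []

-- outer loop of A's fill: builds dp rows 1..m from the previous row
def pvDpRowsGo (rl : List Char) : List Char → Nat → List Nat → List (List Nat)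
  | [], _, _ => []
  | pc :: ps, i, prev =>
    ((i+1) :: pvRowGoA pc rl (prev.drop 1) (prev.headD 0) (i+1)) ::
      pvDpRowsGo rl ps (i+1) ((i+1) :: pvRowGoA pc rl (prev.drop 1) (prev.headD 0) (i+1))

def pvDpA (pl rl : List Char) : List (List Nat) :=
  List.range (rl.length + 1) :: pvDpRowsGo rl pl 0 (List.range (rl.length + 1))

def pvGet2 (dp : List (List Nat)) (i j : Nat) : Nat := (dp.getD i []).getD j 0

-- A's while-loop backtrack, comparing dp values
def pvBackA (pl rl : List Char) (dp : List (List Nat)) : Nat → Nat → List (String × String)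
  | 0, _ => []
  | _+1, 0 => []
  | i+1, j+1 =>
    if pl.getD i ' ' == rl.getD j ' ' then pvBackA pl rl dp i j
    else if pvGet2 dp (i+1) (j+1) == pvGet2 dp i j + 1 then
      (String.ofList [pl.getD i ' '], String.ofList [rl.getD j ' ']) :: pvBackA pl rl dp i j
    else if pvGet2 dp (i+1) (j+1) == pvGet2 dp i (j+1) + 1 then
      pvBackA pl rl dp i (j+1)
    else
      pvBackA pl rl dp (i+1) j
  termination_by i j => i + j

def char_substitutions_py (pred : String) (ref : String) : List (String × String) :=
  pvBackA pred.toList ref.toList (pvDpA pred.toList ref.toList) pred.toList.length ref.toList.length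

-- ===== PORT B =====

-- one fused cell of B: distance together with its substitution chain
-- (the Python chain ((pc,rc), parent) / None is this List's cons / nil)
def pvCellB (pc rc : Char) (diag up left : Nat × List (String × String)) :
    Nat × List (String × String) :=
  if pc == rc then diag
  else
    let b := min diag.1 (min up.1 left.1)
    if diag.1 == b then (b + 1, (String.ofList [pc], String.ofList [rc]) :: diag.2)
    else if up.1 == b then (b + 1, up.2)
    else (b + 1, left.2)

-- B's inner loop over ref chars (rolling previous row of fused cells)
def pvRowGoB (pc : Char) (rcs : List Char) (prevTail : List (Nat × List (String × String)))
    (diag left : Nat × List (String × String)) : List (Nat × List (String × String)) :=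
  match rcs, prevTail with
  | rc :: rcs', up :: prev' =>
    pvCellB pc rc diag up left :: pvRowGoB pc rcs' prev' up (pvCellB pc rc diag up left)
  | _, _ => []

-- B's outer loop: consumes pred chars, returns the FINAL row
def pvRowsB (rl : List Char) :
    List Char → Nat → List (Nat × List (String × String)) → List (Nat × List (String × String))
  | [], _, prev => prev
  | pc :: ps, i, prev =>
    pvRowsB rl ps (i+1)
      ((i+1, ([] : List (String × String))) ::
        pvRowGoB pc rl (prev.drop 1) (prev.headD (0, [])) (i+1, []))

-- B's final while loop reading the chain off the last cell
def pvFlattenB : List (String × String) → List (String × String)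
  | [] => []
  | x :: c => x :: pvFlattenB c

def char_substitutions_py_alt (pred : String) (ref : String) : List (String × String) :=
  pvFlattenB
    ((pvRowsB ref.toList pred.toList 0
        ((List.range (ref.toList.length + 1)).map
          (fun j => (j, ([] : List (String × String)))))).getD ref.toList.length (0, [])).2

-- ===== PRECONDITION & SPEC =====
def Spec_char_substitutions_py (pred : String) (ref : String) (out : List (String × String)) : Prop := out = char_substitutions_py_alt pred ref
instance (pred : String) (ref : String) (out : List (String × String)) : Decidable (Spec_char_substitutions_py pred ref out) := by unfold Spec_char_substitutions_py; infer_instance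

-- ===== CLAIM (what is proved, stated in full; the proofs are below) =====
def Claim_equal_char_substitutions_py : Prop := ∀ (pred : String) (ref : String), Dom_char_substitutions_py pred ref → Spec_char_substitutions_py pred ref (char_substitutions_py pred ref)

-- ===== LEMMAS AND PROOFS =====

-- the mathematical edit-distance recurrence both versions compute
def pvE (pl rl : List Char) : Nat → Nat → Nat
  | 0, j => j
  | i+1, 0 => i+1
  | i+1, j+1 =>
    if pl.getD i ' ' == rl.getD j ' ' then pvE pl rl i j
    else 1 + min (pvE pl rl i j) (min (pvE pl rl i (j+1)) (pvE pl rl (i+1) j))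
  termination_by i j => i + j

-- the substitution chain belonging to cell (i, j)
def pvS (pl rl : List Char) : Nat → Nat → List (String × String)
  | 0, _ => []
  | _+1, 0 => []
  | i+1, j+1 =>
    if pl.getD i ' ' == rl.getD j ' ' then pvS pl rl i j
    else if pvE pl rl i j == min (pvE pl rl i j) (min (pvE pl rl i (j+1)) (pvE pl rl (i+1) j)) then
      (String.ofList [pl.getD i ' '], String.ofList [rl.getD j ' ']) :: pvS pl rl i j
    else if pvE pl rl i (j+1) == min (pvE pl rl i j) (min (pvE pl rl i (j+1)) (pvE pl rl (i+1) j)) then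
      pvS pl rl i (j+1)
    else pvS pl rl (i+1) j
  termination_by i j => i + j

def pvCell (pl rl : List Char) (i j : Nat) : Nat × List (String × String) :=
  (pvE pl rl i j, pvS pl rl i j)

lemma pvE_succ_succ (pl rl : List Char) (i j : Nat) :
    pvE pl rl (i+1) (j+1) =
      if pl.getD i ' ' == rl.getD j ' ' then pvE pl rl i j
      else 1 + min (pvE pl rl i j) (min (pvE pl rl i (j+1)) (pvE pl rl (i+1) j)) := by
  simp only [pvE]

lemma pvS_succ_succ (pl rl : List Char) (i j : Nat) :
    pvS pl rl (i+1) (j+1) =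
      if pl.getD i ' ' == rl.getD j ' ' then pvS pl rl i j
      else if pvE pl rl i j == min (pvE pl rl i j) (min (pvE pl rl i (j+1)) (pvE pl rl (i+1) j)) then
        (String.ofList [pl.getD i ' '], String.ofList [rl.getD j ' ']) :: pvS pl rl i j
      else if pvE pl rl i (j+1) == min (pvE pl rl i j) (min (pvE pl rl i (j+1)) (pvE pl rl (i+1) j)) then
        pvS pl rl i (j+1)
      else pvS pl rl (i+1) j := by
  simp only [pvS]

lemma pvE_zero (pl rl : List Char) (i : Nat) : pvE pl rl i 0 = i := by
  cases i <;> simp [pvE]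

lemma pvS_zero (pl rl : List Char) (i : Nat) : pvS pl rl i 0 = [] := by
  cases i <;> simp [pvS]

lemma pvCell_zero (pl rl : List Char) (i : Nat) : pvCell pl rl i 0 = (i, []) := by
  simp [pvCell, pvE_zero, pvS_zero]

lemma getD_map_range' {α : Type} (f : Nat → α) (d : α) :
    ∀ (n s i : Nat), i < n → ((List.range' s n).map f).getD i d = f (s + i) := by
  intro n
  induction n with
  | zero => intro s i h; omega
  | succ n ih =>
    intro s i h
    rw [List.range'_succ]
    cases i with
    | zero => simp
    | succ i =>
      simp only [List.map_cons, List.getD_cons_succ]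
      rw [ih (s+1) i (by omega)]
      congr 1; omega

lemma drop_cons (l : List Char) (k : Nat) (h : k < l.length) :
    l.drop k = l.getD k ' ' :: l.drop (k+1) := by
  rw [List.getD_eq_getElem l ' ' h]
  exact (List.getElem_cons_drop h).symm

lemma rowGoA_spec (pl rl : List Char) (i : Nat) :
    ∀ (rcs : List Char) (k : Nat), rcs = rl.drop k →
    pvRowGoA (pl.getD i ' ') rcs ((List.range' (k+1) (rl.length - k)).map (pvE pl rl i))
        (pvE pl rl i k) (pvE pl rl (i+1) k)
      = (List.range' (k+1) (rl.length - k)).map (pvE pl rl (i+1)) := by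
  intro rcs
  induction rcs with
  | nil =>
    intro k h
    have hk : rl.length ≤ k := by
      have := congrArg List.length h
      simp at this; omega
    have h0 : rl.length - k = 0 := by omega
    simp [h0, pvRowGoA]
  | cons rc rcs' ih =>
    intro k h
    have hk : k < rl.length := by
      by_contra hc
      rw [List.drop_eq_nil_of_le (by omega)] at h
      simp at h
    rw [drop_cons rl k hk] at h
    injection h with hrc hrcs
    have hlen : rl.length - k = (rl.length - (k+1)) + 1 := by omega
    simp only [hlen, List.range'_succ, List.map_cons]
    simp only [pvRowGoA]
    rw [hrc]
    rw [← pvE_succ_succ]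
    rw [ih (k+1) hrcs]

lemma dpRowsGo_spec (pl rl : List Char) :
    ∀ (ps : List Char) (i : Nat), ps = pl.drop i →
    pvDpRowsGo rl ps i ((List.range' 0 (rl.length + 1)).map (pvE pl rl i))
      = (List.range' (i+1) (pl.length - i)).map
          (fun t => (List.range' 0 (rl.length + 1)).map (pvE pl rl t)) := by
  intro ps
  induction ps with
  | nil =>
    intro i h
    have : pl.length ≤ i := by
      have := congrArg List.length h; simp at this; omega
    have h0 : pl.length - i = 0 := by omega
    simp [h0, pvDpRowsGo]
  | cons pc ps' ih =>
    intro i h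
    have hi : i < pl.length := by
      by_contra hc
      rw [List.drop_eq_nil_of_le (by omega)] at h
      simp at h
    rw [drop_cons pl i hi] at h
    injection h with hpc hps
    have hlen : pl.length - i = (pl.length - (i+1)) + 1 := by omega
    simp only [hlen, List.range'_succ, List.map_cons]
    simp only [pvDpRowsGo]
    simp only [List.drop_one, List.tail_cons, List.headD_cons]
    rw [hpc]
    have hrow := rowGoA_spec pl rl i rl 0 (by simp)
    simp only [Nat.sub_zero] at hrow
    rw [pvE_zero pl rl (i+1)] at hrow
    rw [hrow]
    have hih := ih (i+1) hps
    simp only [List.range'_succ, List.map_cons, pvE_zero] at hih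
    rw [hih]
    simp only [pvE_zero]

lemma dpA_spec (pl rl : List Char) :
    pvDpA pl rl
      = (List.range' 0 (pl.length + 1)).map
          (fun t => (List.range' 0 (rl.length + 1)).map (pvE pl rl t)) := by
  rw [pvDpA]
  have h0 : List.range (rl.length + 1) = (List.range' 0 (rl.length + 1)).map (pvE pl rl 0) := by
    rw [List.range_eq_range']
    apply List.ext_getElem (by simp)
    intro n h1 h2
    simp [pvE]
  rw [h0, dpRowsGo_spec pl rl pl 0 (by simp)]
  simp [List.range'_succ, pvE_zero]

lemma get2_dpA (pl rl : List Char) (i j : Nat) (hi : i ≤ pl.length) (hj : j ≤ rl.length) :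
    pvGet2 (pvDpA pl rl) i j = pvE pl rl i j := by
  rw [pvGet2, dpA_spec]
  rw [getD_map_range' _ _ (pl.length + 1) 0 i (by omega)]
  rw [getD_map_range' _ _ (rl.length + 1) 0 j (by omega)]
  simp only [Nat.zero_add]

-- A's backtrack from (i, j) yields exactly the chain of cell (i, j)
lemma backA_eq_pvS (pl rl : List Char) :
    ∀ (N i j : Nat), i + j ≤ N → i ≤ pl.length → j ≤ rl.length →
    pvBackA pl rl (pvDpA pl rl) i j = pvS pl rl i j := by
  intro N
  induction N with
  | zero =>
    intro i j hN hi hj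
    have hi0 : i = 0 := by omega
    subst hi0
    rw [pvBackA, pvS]
  | succ N ih =>
    intro i j hN hi hj
    match i, j with
    | 0, j => rw [pvBackA, pvS]
    | i+1, 0 => rw [pvBackA, pvS]
    | i+1, j+1 =>
      rw [pvBackA, pvS_succ_succ]
      rw [get2_dpA pl rl (i+1) (j+1) hi hj,
          get2_dpA pl rl i j (by omega) (by omega),
          get2_dpA pl rl i (j+1) (by omega) hj]
      by_cases hm : (pl.getD i ' ' == rl.getD j ' ') = true
      · rw [if_pos hm, if_pos hm]
        exact ih i j (by omega) (by omega) (by omega)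
      · rw [if_neg hm, if_neg hm]
        have hv := pvE_succ_succ pl rl i j
        rw [if_neg hm] at hv
        rw [hv]
        set d := pvE pl rl i j with hd
        set u := pvE pl rl i (j+1) with hu
        set l := pvE pl rl (i+1) j with hl
        by_cases h1 : d = min d (min u l)
        · have t1 : (1 + min d (min u l) == d + 1) = true := by
            simp only [beq_iff_eq]; omega
          have o1 : (d == min d (min u l)) = true := by simp only [beq_iff_eq]; exact h1
          rw [t1, o1]
          simp only [if_true]
          rw [ih i j (by omega) (by omega) (by omega)]
        · have t1 : (1 + min d (min u l) == d + 1) = false := by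
            simp only [beq_eq_false_iff_ne]; omega
          have o1 : (d == min d (min u l)) = false := by
            simp only [beq_eq_false_iff_ne]; exact h1
          rw [t1, o1]
          simp only [Bool.false_eq_true, if_false]
          by_cases h2 : u = min d (min u l)
          · have t2 : (1 + min d (min u l) == u + 1) = true := by
              simp only [beq_iff_eq]; omega
            have o2 : (u == min d (min u l)) = true := by simp only [beq_iff_eq]; exact h2
            rw [t2, o2]
            simp only [if_true]
            exact ih i (j+1) (by omega) (by omega) hj
          · have t2 : (1 + min d (min u l) == u + 1) = false := by
              simp only [beq_eq_false_iff_ne]; omega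
            have o2 : (u == min d (min u l)) = false := by
              simp only [beq_eq_false_iff_ne]; exact h2
            rw [t2, o2]
            simp only [Bool.false_eq_true, if_false]
            exact ih (i+1) j (by omega) hi (by omega)

-- B's fused cell step realises exactly (pvE, pvS) at (i+1, j+1)
lemma cellB_spec (pl rl : List Char) (i j : Nat) :
    pvCellB (pl.getD i ' ') (rl.getD j ' ')
        (pvCell pl rl i j) (pvCell pl rl i (j+1)) (pvCell pl rl (i+1) j)
      = pvCell pl rl (i+1) (j+1) := by
  simp only [pvCellB, pvCell]
  by_cases hm : (pl.getD i ' ' == rl.getD j ' ') = true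
  · rw [if_pos hm]
    rw [pvE_succ_succ, pvS_succ_succ, if_pos hm, if_pos hm]
  · rw [if_neg hm]
    rw [pvE_succ_succ, pvS_succ_succ, if_neg hm, if_neg hm]
    set d := pvE pl rl i j
    set u := pvE pl rl i (j+1)
    set l := pvE pl rl (i+1) j
    have hadd : min d (min u l) + 1 = 1 + min d (min u l) := by omega
    split_ifs with h1 h2 <;> simp [hadd]

lemma rowGoB_spec (pl rl : List Char) (i : Nat) :
    ∀ (rcs : List Char) (k : Nat), rcs = rl.drop k →
    pvRowGoB (pl.getD i ' ') rcs ((List.range' (k+1) (rl.length - k)).map (pvCell pl rl i))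
        (pvCell pl rl i k) (pvCell pl rl (i+1) k)
      = (List.range' (k+1) (rl.length - k)).map (pvCell pl rl (i+1)) := by
  intro rcs
  induction rcs with
  | nil =>
    intro k h
    have hk : rl.length ≤ k := by
      have := congrArg List.length h
      simp at this; omega
    have h0 : rl.length - k = 0 := by omega
    simp [h0, pvRowGoB]
  | cons rc rcs' ih =>
    intro k h
    have hk : k < rl.length := by
      by_contra hc
      rw [List.drop_eq_nil_of_le (by omega)] at h
      simp at h
    rw [drop_cons rl k hk] at h
    injection h with hrc hrcs
    have hlen : rl.length - k = (rl.length - (k+1)) + 1 := by omega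
    simp only [hlen, List.range'_succ, List.map_cons]
    simp only [pvRowGoB]
    rw [hrc, cellB_spec pl rl i k]
    rw [ih (k+1) hrcs]

lemma rowsB_spec (pl rl : List Char) :
    ∀ (ps : List Char) (i : Nat), i ≤ pl.length → ps = pl.drop i →
    pvRowsB rl ps i ((List.range' 0 (rl.length + 1)).map (pvCell pl rl i))
      = (List.range' 0 (rl.length + 1)).map (pvCell pl rl pl.length) := by
  intro ps
  induction ps with
  | nil =>
    intro i hle h
    have hge : pl.length ≤ i := by
      have := congrArg List.length h; simp at this; omega
    have hi : i = pl.length := by omega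
    subst hi
    rw [pvRowsB]
  | cons pc ps' ih =>
    intro i hle h
    have hi : i < pl.length := by
      by_contra hc
      rw [List.drop_eq_nil_of_le (by omega)] at h
      simp at h
    rw [drop_cons pl i hi] at h
    injection h with hpc hps
    rw [pvRowsB]
    simp only [List.range'_succ, List.map_cons, List.drop_one, List.tail_cons,
      List.headD_cons, pvCell_zero]
    rw [hpc]
    have hrow := rowGoB_spec pl rl i rl 0 (by simp)
    simp only [Nat.sub_zero, pvCell_zero] at hrow
    rw [hrow]
    have hih := ih (i+1) (by omega) hps
    simp only [List.range'_succ, List.map_cons, pvCell_zero] at hih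
    exact hih

lemma flattenB_id : ∀ (l : List (String × String)), pvFlattenB l = l := by
  intro l
  induction l with
  | nil => rfl
  | cons x c ih => rw [pvFlattenB, ih]

lemma altB_eq_pvS (pl rl : List Char) (pred ref : String)
    (hp : pred.toList = pl) (hr : ref.toList = rl) :
    char_substitutions_py_alt pred ref = pvS pl rl pl.length rl.length := by
  rw [char_substitutions_py_alt, hp, hr, flattenB_id]
  have h0 : (List.range (rl.length + 1)).map
      (fun j => (j, ([] : List (String × String))))
      = (List.range' 0 (rl.length + 1)).map (pvCell pl rl 0) := by
    rw [List.range_eq_range']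
    apply List.ext_getElem (by simp)
    intro n h1 h2
    simp [pvCell, pvE, pvS]
  rw [h0, rowsB_spec pl rl pl 0 (by omega) (by simp)]
  rw [getD_map_range' _ _ (rl.length + 1) 0 rl.length (by omega)]
  simp [pvCell]

-- ===== VERDICT (by name: the statement is the Claim_ definition above) =====
theorem char_substitutions_py_spec : Claim_equal_char_substitutions_py := by
  intro pred ref _
  unfold Spec_char_substitutions_py char_substitutions_py
  rw [altB_eq_pvS pred.toList ref.toList pred ref rfl rfl]
  exact backA_eq_pvS pred.toList ref.toList (pred.toList.length + ref.toList.length)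
    pred.toList.length ref.toList.length (le_refl _) (le_refl _) (le_refl _)
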